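-- pv_equiv track=rewrite | github.com/olivercalder/sonic-signatures | Analysis/group_status.py | generate_next_merges
-- ===== SOURCE A (Python) =====
-- import itertools
--
-- def merge_groups(groupings, *indices):
--     indices = sorted(indices)
--     if len(indices) < 2:
--         return groupings
--     else:
--         i, j = indices[-2], indices[-1]
--         merged = tuple(sorted(groupings[i] + groupings[j]))
--         new_groupings = tuple(groupings[:i] + (merged,) + groupings[i+1:j] + groupings[j+1:])
--         return merge_groups(new_groupings, indices[:-1])
--
-- def generate_next_merges(groupings, contiguous=True):
--     groupings = tuple(sorted(groupings, key=lambda g: g[0]))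
--     possibilities = []
--     if contiguous:
--         for i in range(len(groupings) - 1):
--             possibilities.append(merge_groups(groupings, i, i+1))
--     else:
--         for (i, j) in itertools.combinations(range(len(groupings)), 2):
--             possibilities.append(merge_groups(groupings, i, j))
--     return possibilities
-- ===== SOURCE B (Python) =====
-- def generate_next_merges(groupings, contiguous=True):
--     gs = tuple(sorted(groupings, key=lambda g: g[0]))
--
--     def picks(xs):
--         if not xs:
--             return []
--         return [(xs[0], xs[1:])] + [(y, (xs[0],) + ys) for y, ys in picks(xs[1:])]
--
--     def rec(rest):
--         if len(rest) < 2: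
--             return []
--         head, tail = rest[0], rest[1:]
--         if contiguous:
--             firsts = [(tuple(sorted(head + tail[0])),) + tail[1:]]
--         else:
--             firsts = [(tuple(sorted(head + t)),) + ys for t, ys in picks(tail)]
--         return firsts + [(head,) + p for p in rec(tail)]
--
--     return rec(gs)
-- ===== Notes on version B (the rewrite author's own statement) =====
-- stated objective: alternative
-- what changed: Replaces A's index arithmetic entirely: no ranges, no itertools.combinations and no slice-based merge_groups helper; B recurses structurally on the sorted list (each level emits the merges involving the head -- via a 'picks' one-out selection for the non-contiguous case -- and prepends the head to the recursively generated merges of the tail).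
import Mathlib
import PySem

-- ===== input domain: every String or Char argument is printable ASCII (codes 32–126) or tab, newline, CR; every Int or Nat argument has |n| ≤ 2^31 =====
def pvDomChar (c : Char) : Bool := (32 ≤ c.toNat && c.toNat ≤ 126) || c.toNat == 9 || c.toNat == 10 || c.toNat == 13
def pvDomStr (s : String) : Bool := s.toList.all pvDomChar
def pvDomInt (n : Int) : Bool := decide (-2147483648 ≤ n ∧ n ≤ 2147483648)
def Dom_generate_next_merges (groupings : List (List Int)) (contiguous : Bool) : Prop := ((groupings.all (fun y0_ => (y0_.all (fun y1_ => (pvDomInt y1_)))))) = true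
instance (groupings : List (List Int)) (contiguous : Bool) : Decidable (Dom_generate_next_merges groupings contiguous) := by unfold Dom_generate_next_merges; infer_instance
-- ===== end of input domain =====

-- B drops A's index machinery (ranges, itertools.combinations, the slice-based merge_groups
-- helper) and instead recurses structurally on the sorted list; equal return values are
-- proved on Pre_ (no empty group).

-- ===== PORT A =====
-- merge_groups(groupings, i, j): inside, indices = sorted((i, j)) has length 2, so one merge
-- happens; the recursive call merge_groups(new_groupings, indices[:-1]) packs indices[:-1]
-- into a SINGLE variadic argument, so len(indices) == 1 < 2 there and it returns new_groupings
-- unchanged.  We port that immediate return literally (the recursion is dead).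
-- groupings[i]/groupings[j] are ported with pyGetD (every call site passes in-range indices).
def merge_groups (groupings : List (List Int)) (i j : Int) : List (List Int) :=
  let indices := PySem.List.sorted [i, j] id false
  if indices.length < 2 then groupings
  else
    let i := PySem.List.pyGetD indices (-2) 0
    let j := PySem.List.pyGetD indices (-1) 0
    let merged := PySem.List.sorted ((PySem.List.pyGetD groupings i []) ++ (PySem.List.pyGetD groupings j [])) id false
    PySem.List.slice groupings none (some i) ++ [merged]
      ++ PySem.List.slice groupings (some (i + 1)) (some j)
      ++ PySem.List.slice groupings (some (j + 1)) none

-- itertools.combinations(range(n), 2): lexicographic pairs (i, j) with i < j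
def pvCombinations2 (n : Int) : List (Int × Int) :=
  (PySem.List.pyRange 0 n 1).flatMap (fun i => (PySem.List.pyRange (i + 1) n 1).map (fun j => (i, j)))

def generate_next_merges (groupings : List (List Int)) (contiguous : Bool) : List (List (List Int)) :=
  let gs := PySem.List.sorted groupings (fun g => PySem.List.pyGetD g 0 0) false
  if contiguous then
    (PySem.List.pyRange 0 ((gs.length : Int) - 1) 1).map (fun i => merge_groups gs i (i + 1))
  else
    (pvCombinations2 (gs.length : Int)).map (fun p => merge_groups gs p.1 p.2)

-- ===== PORT B =====
-- picks(xs): all ways to choose one element of xs, paired with the rest in order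
def pvPicks (xs : List (List Int)) : List (List Int × List (List Int)) :=
  match xs with
  | [] => []
  | x :: t => (x, t) :: (pvPicks t).map (fun p => (p.1, x :: p.2))

-- rec(rest): merges involving the head, then head prepended to the merges of the tail
def pvRec (contiguous : Bool) : List (List Int) → List (List (List Int))
  | [] => []
  | [_] => []
  | head :: t :: r =>
    (if contiguous then
      [PySem.List.sorted (head ++ t) id false :: r]
    else
      (pvPicks (t :: r)).map (fun p => PySem.List.sorted (head ++ p.1) id false :: p.2))
    ++ (pvRec contiguous (t :: r)).map (fun p => head :: p)

def generate_next_merges_alt (groupings : List (List Int)) (contiguous : Bool) : List (List (List Int)) :=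
  pvRec contiguous (PySem.List.sorted groupings (fun g => PySem.List.pyGetD g 0 0) false)

-- ===== PRECONDITION & SPEC =====
-- Pre_ excludes groupings containing an empty group: there Python A raises IndexError in the
-- sort key g[0] (and B raises identically).
def Pre_generate_next_merges (groupings : List (List Int)) (contiguous : Bool) : Prop :=
  ∀ g ∈ groupings, g ≠ []
instance (groupings : List (List Int)) (contiguous : Bool) : Decidable (Pre_generate_next_merges groupings contiguous) := by unfold Pre_generate_next_merges; infer_instance
def pvWitness_generate_next_merges : List (List Int) × Bool := ([[3], [1, 2], [5]], false)

def Spec_generate_next_merges (groupings : List (List Int)) (contiguous : Bool) (out : List (List (List Int))) : Prop := out = generate_next_merges_alt groupings contiguous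
instance (groupings : List (List Int)) (contiguous : Bool) (out : List (List (List Int))) : Decidable (Spec_generate_next_merges groupings contiguous out) := by unfold Spec_generate_next_merges; infer_instance

-- ===== CLAIM (what is proved, stated in full; the proofs are below) =====
def Claim_equal_generate_next_merges : Prop := ∀ (groupings : List (List Int)) (contiguous : Bool), Dom_generate_next_merges groupings contiguous → Pre_generate_next_merges groupings contiguous → Spec_generate_next_merges groupings contiguous (generate_next_merges groupings contiguous)

-- ===== LEMMAS AND PROOFS =====

lemma merge_td (gs : List (List Int)) (i j : Int) (h0 : 0 ≤ i) (hij : i < j)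
    (hj : j < (gs.length : Int)) :
    merge_groups gs i j
      = gs.take i.toNat
        ++ PySem.List.sorted (gs.getD i.toNat [] ++ gs.getD j.toNat []) id false
          :: ((gs.drop (i.toNat + 1)).take (j.toNat - (i.toNat + 1)) ++ gs.drop (j.toNat + 1)) := by
  have hij' : i ≤ j := le_of_lt hij
  have h0j : (0 : Int) ≤ j := le_trans h0 hij'
  have hp : List.Pairwise (fun a b => id a ≤ id b) [i, j] :=
    List.Pairwise.cons (fun b hb => by simp at hb; simpa [hb] using hij')
      (List.pairwise_singleton _ _)
  have hs : PySem.List.sorted [i, j] id false = [i, j] :=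
    PySem.List.sorted_eq_self_of_pairwise [i, j] id hp
  have hm2 : PySem.List.pyGetD [i, j] (-2) 0 = i := by
    simp [PySem.List.pyGetD, PySem.List.pyGet?, PySem.List.pyIdx?]
  have hm1 : PySem.List.pyGetD [i, j] (-1) 0 = j := by
    simp [PySem.List.pyGetD, PySem.List.pyGet?, PySem.List.pyIdx?]
  rw [merge_groups, hs]
  simp only [List.length_cons, List.length_nil, hm2, hm1]
  rw [if_neg (by omega)]
  rw [PySem.List.slice_to gs h0, PySem.List.slice_from gs (by omega : (0:Int) ≤ j + 1),
      PySem.List.slice_toNat gs (by omega : (0:Int) ≤ i + 1) h0j]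
  have e1 : (i + 1).toNat = i.toNat + 1 := by omega
  have e2 : (j + 1).toNat = j.toNat + 1 := by omega
  rw [e1, e2]
  rw [PySem.List.pyGetD_eq_getElem (h0 := h0) (h1 := by omega),
      PySem.List.pyGetD_eq_getElem (h0 := h0j) (h1 := by omega)]
  rw [List.getD_eq_getElem gs [] (by omega), List.getD_eq_getElem gs [] (by omega)]
  simp

lemma merge_shift (x : List Int) (gs : List (List Int)) (i j : Int) (h0 : 0 ≤ i) (hij : i < j)
    (hj : j < (gs.length : Int)) :
    merge_groups (x :: gs) (i + 1) (j + 1) = x :: merge_groups gs i j := by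
  rw [merge_td (x :: gs) (i+1) (j+1) (by omega) (by omega) (by simp; omega),
      merge_td gs i j h0 hij hj]
  have e1 : (i + 1).toNat = i.toNat + 1 := by omega
  have e2 : (j + 1).toNat = j.toNat + 1 := by omega
  rw [e1, e2]
  simp

lemma merge_base_cont (x y : List Int) (r : List (List Int)) :
    merge_groups (x :: y :: r) 0 1 = PySem.List.sorted (x ++ y) id false :: r := by
  rw [merge_td (x :: y :: r) 0 1 (by omega) (by omega) (by simp)]
  simp

lemma merge_base_nc (x : List Int) (t : List (List Int)) (k : Nat) (hk : k < t.length) :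
    merge_groups (x :: t) 0 (1 + (k : Int))
      = PySem.List.sorted (x ++ t.getD k []) id false :: (t.take k ++ t.drop (k + 1)) := by
  rw [merge_td (x :: t) 0 (1 + (k : Int)) (by omega) (by omega) (by simp; omega)]
  have e : (1 + (k : Int)).toNat = k + 1 := by omega
  rw [e]
  simp

lemma picks_spec (t : List (List Int)) :
    pvPicks t = (List.range t.length).map (fun k => (t.getD k [], t.take k ++ t.drop (k + 1))) := by
  induction t with
  | nil => simp [pvPicks]
  | cons y r ih =>
      rw [pvPicks, ih]
      simp [List.range_succ_eq_map, List.map_map, Function.comp_def]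

lemma pyRange_shift (a b : Int) :
    PySem.List.pyRange (a + 1) (b + 1) 1 = (PySem.List.pyRange a b 1).map (· + 1) := by
  rw [PySem.List.pyRange_one, PySem.List.pyRange_one, List.map_map]
  have h : b + 1 - (a + 1) = b - a := by ring
  rw [h]
  apply List.map_congr_left
  intro k _
  simp [Function.comp]
  ring

lemma cont_eq (gs : List (List Int)) :
    (PySem.List.pyRange 0 ((gs.length : Int) - 1) 1).map (fun i => merge_groups gs i (i + 1))
      = pvRec true gs := by
  induction gs with
  | nil => rw [PySem.List.pyRange_one_eq_nil (by simp)]; simp [pvRec]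
  | cons x t ih =>
      cases t with
      | nil => rw [PySem.List.pyRange_one_eq_nil (by simp)]; simp [pvRec]
      | cons y r =>
          have hb : ((x :: y :: r).length : Int) - 1 = ((r.length + 1 : Nat) : Int) := by
            simp
          rw [hb, PySem.List.pyRange_zero_natCast, List.range_succ_eq_map]
          have hb2 : ((y :: r).length : Int) - 1 = ((r.length : Nat) : Int) := by
            simp
          rw [hb2, PySem.List.pyRange_zero_natCast] at ih
          simp only [List.map_cons, List.map_map, Function.comp_def, Nat.cast_zero, Nat.cast_succ]
          norm_num
          rw [merge_base_cont]
          show _ = pvRec true (x :: y :: r)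
          rw [show pvRec true (x :: y :: r)
                = [PySem.List.sorted (x ++ y) id false :: r]
                  ++ (pvRec true (y :: r)).map (fun p => x :: p) from rfl]
          rw [← ih, List.map_map]
          simp only [List.singleton_append, Function.comp_def]
          congr 1
          rw [List.map_map]
          apply List.map_congr_left
          intro k hk
          rw [List.mem_range] at hk
          have := merge_shift x (y :: r) (k : Int) ((k : Int) + 1) (by omega) (by omega)
            (by simp; omega)
          simpa using this

lemma nc_eq (gs : List (List Int)) :
    (pvCombinations2 (gs.length : Int)).map (fun p => merge_groups gs p.1 p.2)
      = pvRec false gs := by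
  have hform : ∀ (hs : List (List Int)),
      (pvCombinations2 (hs.length : Int)).map (fun p => merge_groups hs p.1 p.2)
        = (PySem.List.pyRange 0 (hs.length : Int) 1).flatMap
            (fun i => (PySem.List.pyRange (i + 1) (hs.length : Int) 1).map
              (fun j => merge_groups hs i j)) := by
    intro hs
    simp [pvCombinations2, List.map_flatMap, List.map_map, Function.comp_def]
  have hr : ∀ m : Nat, PySem.List.pyRange 1 ((m : Nat) + 1 : Int) 1
      = (List.range m).map (fun k : Nat => 1 + (k : Int)) := by
    intro m
    rw [PySem.List.pyRange_one]
    norm_num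
  rw [hform]
  induction gs with
  | nil => rw [PySem.List.pyRange_one_eq_nil (by simp)]; simp [pvRec]
  | cons x t ih =>
      cases t with
      | nil =>
          simp only [List.length_cons, List.length_nil]
          rw [PySem.List.pyRange_one_cons (by omega), PySem.List.pyRange_one_eq_nil (by omega)]
          simp [pvRec, PySem.List.pyRange_one_eq_nil]
      | cons y r =>
          set t := y :: r with ht
          have hn : ((x :: t).length : Int) = ((t.length : Nat) : Int) + 1 := by simp
          rw [hn, PySem.List.pyRange_one_cons (by omega), List.flatMap_cons]
          rw [show (0 : Int) + 1 = 1 from rfl, hr t.length]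
          -- first block: merges of the head with each tail element = the picks map
          have hfirst : ((List.range t.length).map (fun k : Nat => 1 + (k : Int))).map
                (fun j => merge_groups (x :: t) 0 j)
              = (pvPicks t).map (fun p => PySem.List.sorted (x ++ p.1) id false :: p.2) := by
            rw [List.map_map, picks_spec, List.map_map]
            apply List.map_congr_left
            intro k hk
            rw [List.mem_range] at hk
            simp only [Function.comp_def]
            rw [merge_base_nc x t k hk]
          -- rest: every merge with i ≥ 1 is x :: a merge inside t
          have hrest : ((List.range t.length).map (fun k : Nat => 1 + (k : Int))).flatMap
                (fun i => (PySem.List.pyRange (i + 1) (((t.length : Nat) : Int) + 1) 1).map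
                  (fun j => merge_groups (x :: t) i j))
              = ((PySem.List.pyRange 0 ((t.length : Nat) : Int) 1).flatMap
                  (fun i => (PySem.List.pyRange (i + 1) ((t.length : Nat) : Int) 1).map
                    (fun j => merge_groups t i j))).map (fun p => x :: p) := by
            rw [List.map_flatMap, PySem.List.pyRange_zero_natCast, List.flatMap_map,
                List.flatMap_map]
            apply List.flatMap_congr
            intro k hk
            rw [List.mem_range] at hk
            have hsh : PySem.List.pyRange ((1 + (k : Int)) + 1) (((t.length : Nat) : Int) + 1) 1
                = (PySem.List.pyRange ((k : Int) + 1) ((t.length : Nat) : Int) 1).map (· + 1) := by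
              rw [show (1 + (k : Int)) + 1 = ((k : Int) + 1) + 1 by ring, pyRange_shift]
            rw [hsh, List.map_map, List.map_map]
            apply List.map_congr_left
            intro j hj
            rw [PySem.List.mem_pyRange_one] at hj
            simp only [Function.comp_def]
            rw [show (1 + (k : Int)) = (k : Int) + 1 by ring,
                merge_shift x t (k : Int) j (by omega) (by omega) (by omega)]
          rw [hfirst, hrest, ih]
          rfl

-- ===== VERDICT (by name: the statement is the Claim_ definition above) =====
theorem generate_next_merges_spec : Claim_equal_generate_next_merges := by
  intro groupings contiguous _hdom _hpre
  unfold Spec_generate_next_merges generate_next_merges generate_next_merges_alt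
  cases contiguous with
  | true => simpa using cont_eq (PySem.List.sorted groupings (fun g => PySem.List.pyGetD g 0 0) false)
  | false => simpa using nc_eq (PySem.List.sorted groupings (fun g => PySem.List.pyGetD g 0 0) false)
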